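-- pv_equiv track=rewrite | github.com/PhoenixUBW/Online-Grade-Distribution-System | application.py | valid_class_code
-- ===== SOURCE A (Python) =====
-- NUMBERS = ("0","1","2","3","4","5","6","7","8","9")
--
-- ALPHABET = (" ","a", "b", "c", "d", "e", "f", "g", "h", "i", "j", "k", "l", "m", "n", "o", "p", "q", "r", "s", "t", "u", "v", "w", "x", "y",
--            "z","A", "B", "C", "D", "E", "F", "G", "H", "I", "J", "K", "L", "M", "N", "O", "P", "Q", "R", "S", "T", "U", "V", "W", "X", "Y", "Z")
--
-- def valid_class_code(data):
--     """Checks whether the inputted data is a valid class code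
--
--     Returns True or False and error"""
--     error = None
--     if data == "":
--         error = "No class code inputted "
--         return False, error
--     for char in data: # For every character in the input
--         if char not in ALPHABET and char not in NUMBERS: # It is false if that character isn't a letter or a number
--             error = "Class code must only contain alphabetic and numeric characters"
--             return False, error
--     return True, error
-- ===== SOURCE B (Python) =====
-- import re
--
-- _CLASS_CODE_RE = re.compile(r'[0-9A-Za-z ]*\Z')
--
-- def valid_class_code(data):
--     """Checks whether the inputted data is a valid class code
--
--     Returns True or False and error"""
--     if data == "":
--         return False, "No class code inputted "
--     if _CLASS_CODE_RE.match(data):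
--         return True, None
--     return False, "Class code must only contain alphabetic and numeric characters"
-- ===== Notes on version B (the rewrite author's own statement) =====
-- stated objective: idiomatic
-- what changed: Replaced the per-character scan with membership tests against two tuples by a single precompiled regex full-match over the explicit ASCII class [0-9A-Za-z ].
import Mathlib
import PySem

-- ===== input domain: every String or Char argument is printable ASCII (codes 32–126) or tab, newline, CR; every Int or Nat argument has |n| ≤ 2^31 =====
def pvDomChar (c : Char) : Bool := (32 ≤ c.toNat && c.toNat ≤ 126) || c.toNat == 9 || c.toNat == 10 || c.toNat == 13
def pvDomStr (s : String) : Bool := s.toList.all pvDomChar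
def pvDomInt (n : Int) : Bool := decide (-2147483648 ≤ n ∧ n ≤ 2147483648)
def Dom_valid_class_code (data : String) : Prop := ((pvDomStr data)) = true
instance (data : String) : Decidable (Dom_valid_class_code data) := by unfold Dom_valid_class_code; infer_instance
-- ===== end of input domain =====

-- B replaces A's per-character tuple-membership scan with a single regex-style
-- full-match against the explicit ASCII class [0-9A-Za-z ] (more idiomatic).


-- ===== PORT A =====
def pvNUMBERS : List Char := ['0','1','2','3','4','5','6','7','8','9']
def pvALPHABET : List Char :=
  [' ','a','b','c','d','e','f','g','h','i','j','k','l','m','n','o','p','q','r','s','t','u','v','w','x','y',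
   'z','A','B','C','D','E','F','G','H','I','J','K','L','M','N','O','P','Q','R','S','T','U','V','W','X','Y','Z']

-- the for-loop of A: scan characters, early-return on the first invalid one
def validA_loop : List Char → Bool × Option String
  | [] => (true, none)
  | c :: rest =>
      if ¬ pvALPHABET.contains c ∧ ¬ pvNUMBERS.contains c then
        (false, some "Class code must only contain alphabetic and numeric characters")
      else validA_loop rest

def valid_class_code (data : String) : Bool × Option String :=
  if data = "" then (false, some "No class code inputted ")
  else validA_loop data.toList

-- ===== PORT B =====
-- the regex class [0-9A-Za-z ] of Source B, exact on ASCII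
def pvClassChar (c : Char) : Bool :=
  ('0' ≤ c && c ≤ '9') || ('A' ≤ c && c ≤ 'Z') || ('a' ≤ c && c ≤ 'z') || c == ' '

def valid_class_code_alt (data : String) : Bool × Option String :=
  if data = "" then (false, some "No class code inputted ")
  else if data.toList.all pvClassChar then (true, none)
  else (false, some "Class code must only contain alphabetic and numeric characters")

-- ===== PRECONDITION & SPEC =====
def Spec_valid_class_code (data : String) (out : Bool × Option String) : Prop := out = valid_class_code_alt data
instance (data : String) (out : Bool × Option String) : Decidable (Spec_valid_class_code data out) := by unfold Spec_valid_class_code; infer_instance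

-- ===== CLAIM (what is proved, stated in full; the proofs are below) =====
def Claim_equal_valid_class_code : Prop := ∀ (data : String), Dom_valid_class_code data → Spec_valid_class_code data (valid_class_code data)

-- ===== LEMMAS AND PROOFS =====

-- per-character agreement: membership in A's tuples = B's character class
theorem memA_iff (c : Char) : (c ∈ pvALPHABET ∨ c ∈ pvNUMBERS) ↔ pvClassChar c = true := by
  simp only [pvALPHABET, pvNUMBERS, pvClassChar, List.mem_cons, List.not_mem_nil, or_false,
    Char.le_def, UInt32.le_iff_toNat_le, beq_iff_eq, Char.ext_iff, UInt32.ext_iff,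
    Bool.or_eq_true, Bool.and_eq_true, decide_eq_true_eq]
  simp only [show ('0' : Char).val.toNat = 48 from rfl, show ('1' : Char).val.toNat = 49 from rfl, show ('2' : Char).val.toNat = 50 from rfl, show ('3' : Char).val.toNat = 51 from rfl, show ('4' : Char).val.toNat = 52 from rfl, show ('5' : Char).val.toNat = 53 from rfl, show ('6' : Char).val.toNat = 54 from rfl, show ('7' : Char).val.toNat = 55 from rfl, show ('8' : Char).val.toNat = 56 from rfl, show ('9' : Char).val.toNat = 57 from rfl, show (' ' : Char).val.toNat = 32 from rfl, show ('a' : Char).val.toNat = 97 from rfl, show ('b' : Char).val.toNat = 98 from rfl, show ('c' : Char).val.toNat = 99 from rfl, show ('d' : Char).val.toNat = 100 from rfl, show ('e' : Char).val.toNat = 101 from rfl, show ('f' : Char).val.toNat = 102 from rfl, show ('g' : Char).val.toNat = 103 from rfl, show ('h' : Char).val.toNat = 104 from rfl, show ('i' : Char).val.toNat = 105 from rfl, show ('j' : Char).val.toNat = 106 from rfl, show ('k' : Char).val.toNat = 107 from rfl, show ('l' : Char).val.toNat = 108 from rfl, show ('m' : Char).val.toNat = 109 from rfl, show ('n' : Char).val.toNat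 = 110 from rfl, show ('o' : Char).val.toNat = 111 from rfl, show ('p' : Char).val.toNat = 112 from rfl, show ('q' : Char).val.toNat = 113 from rfl, show ('r' : Char).val.toNat = 114 from rfl, show ('s' : Char).val.toNat = 115 from rfl, show ('t' : Char).val.toNat = 116 from rfl, show ('u' : Char).val.toNat = 117 from rfl, show ('v' : Char).val.toNat = 118 from rfl, show ('w' : Char).val.toNat = 119 from rfl, show ('x' : Char).val.toNat = 120 from rfl, show ('y' : Char).val.toNat = 121 from rfl, show ('z' : Char).val.toNat = 122 from rfl, show ('A' : Char).val.toNat = 65 from rfl, show ('B' : Char).val.toNat = 66 from rfl, show ('C' : Char).val.toNat = 67 from rfl, show ('D' : Char).val.toNat = 68 from rfl, show ('E' : Char).val.toNat = 69 from rfl, show ('F' : Char).val.toNat = 70 from rfl, show ('G' : Char).val.toNat = 71 from rfl, show ('H' : Char).val.toNat = 72 from rfl, show ('I' : Char).val.toNat = 73 from rfl, show ('J' : Char).val.toNat = 74 from rfl, show ('K' : Char).val.toNat = 75 from rfl, show ('L' : Char).val.toNat = 76 from rfl, show ('M' : Char).val.toNat = 77 from rfl, show ('N' : Char).val.toNat =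 78 from rfl, show ('O' : Char).val.toNat = 79 from rfl, show ('P' : Char).val.toNat = 80 from rfl, show ('Q' : Char).val.toNat = 81 from rfl, show ('R' : Char).val.toNat = 82 from rfl, show ('S' : Char).val.toNat = 83 from rfl, show ('T' : Char).val.toNat = 84 from rfl, show ('U' : Char).val.toNat = 85 from rfl, show ('V' : Char).val.toNat = 86 from rfl, show ('W' : Char).val.toNat = 87 from rfl, show ('X' : Char).val.toNat = 88 from rfl, show ('Y' : Char).val.toNat = 89 from rfl, show ('Z' : Char).val.toNat = 90 from rfl]
  omega

theorem loopA_eq (l : List Char) :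
    validA_loop l = (if l.all pvClassChar then (true, none)
      else (false, some "Class code must only contain alphabetic and numeric characters")) := by
  induction l with
  | nil => simp [validA_loop]
  | cons c rest ih =>
      by_cases hmem : c ∈ pvALPHABET ∨ c ∈ pvNUMBERS
      · have hc : pvClassChar c = true := (memA_iff c).mp hmem
        rcases hmem with h' | h' <;> simp [validA_loop, List.all_cons, hc, h', ih]
      · have hc : ¬ pvClassChar c = true := fun h => hmem ((memA_iff c).mpr h)
        push Not at hmem
        simp [validA_loop, List.all_cons, hc, hmem.1, hmem.2]

-- ===== VERDICT (by name: the statement is the Claim_ definition above) =====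
theorem valid_class_code_spec : Claim_equal_valid_class_code := by
  intro data _
  unfold Spec_valid_class_code valid_class_code valid_class_code_alt
  by_cases h : data = "" <;> simp [h, loopA_eq]
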